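-- pv_equiv track=rewrite | github.com/pratham093/Encryption-Decryption | Decryption.py | row_detransposition
-- ===== SOURCE A (Python) =====
-- def row_detransposition(cipher, row_key):
--     num_columns = len(row_key)
--     num_rows = len(cipher) // num_columns
--     rows = ['' for _ in range(num_rows)]
--     sorted_key = sorted(range(num_columns), key=lambda k:row_key[k])
--     for i in range(num_rows):
--         row = cipher[i * num_columns:(i + 1) * num_columns]
--         for j in range(num_columns):
--             rows[i] += row[sorted_key[j]]
--     message = ''.join(rows)
--
--     return message
-- ===== SOURCE B (Python) =====
-- def row_detransposition(cipher, row_key):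
--     num_columns = len(row_key)
--     num_rows = len(cipher) // num_columns
--     # rank[j] = final column of the character that sits in column j of a cipher row,
--     # computed by counting (no sort): stable rank of row_key[j] among all key values.
--     rank = [sum(1 for k in range(num_columns)
--                 if row_key[k] < row_key[j] or (row_key[k] == row_key[j] and k < j))
--             for j in range(num_columns)]
--     pieces = []
--     for i in range(num_rows):
--         row = cipher[i * num_columns:(i + 1) * num_columns]
--         slot = [''] * num_columns
--         for j, ch in enumerate(row):
--             slot[rank[j]] = ch
--         pieces.append(''.join(slot))
--     return ''.join(pieces)
-- ===== Notes on version B (the rewrite author's own statement) =====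
-- stated objective: alternative
-- what changed: B eliminates the sort entirely: it computes each column's stable rank by direct counting (how many key entries are smaller, or equal with a smaller index) and scatters every row character straight into its destination slot, instead of A's argsort of the key followed by gathering row[sorted_key[j]].
import Mathlib
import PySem

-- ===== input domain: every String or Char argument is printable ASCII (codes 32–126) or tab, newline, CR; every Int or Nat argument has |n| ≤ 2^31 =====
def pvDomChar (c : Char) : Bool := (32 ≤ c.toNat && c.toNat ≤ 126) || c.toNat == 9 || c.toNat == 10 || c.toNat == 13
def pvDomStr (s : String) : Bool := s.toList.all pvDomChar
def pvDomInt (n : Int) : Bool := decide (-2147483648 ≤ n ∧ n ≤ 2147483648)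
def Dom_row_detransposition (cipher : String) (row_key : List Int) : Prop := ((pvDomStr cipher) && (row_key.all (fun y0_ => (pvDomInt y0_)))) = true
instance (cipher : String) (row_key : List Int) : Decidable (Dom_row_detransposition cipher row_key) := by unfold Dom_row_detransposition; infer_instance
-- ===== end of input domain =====

-- B replaces A's argsort-then-gather by a sort-free algorithm: it counts each column's stable rank
-- directly and scatters every cipher character straight into its destination slot (alternative decomposition).

-- ===== PORT A =====
-- pyGetD with a default is exact here: every index Python takes (j < num_columns, sorted_key[j] < num_columns,
-- row of length num_columns) is in range, so Python's indexing never raises on these accesses.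
def row_detransposition (cipher : String) (row_key : List Int) : String :=
  let num_columns : Int := PySem.List.len row_key
  let num_rows : Int := PySem.Int.floordiv (PySem.Str.len cipher) num_columns
  let sorted_key : List Int :=
    PySem.List.sorted (PySem.List.pyRange 0 num_columns) (fun k => PySem.List.pyGetD row_key k 0) false
  let rows : List (List Char) :=
    (PySem.List.pyRange 0 num_rows).map (fun i =>
      let row := PySem.List.slice cipher.toList (some (i * num_columns)) (some ((i + 1) * num_columns))
      (PySem.List.pyRange 0 num_columns).foldl
        (fun acc j => acc ++ [PySem.List.pyGetD row (PySem.List.pyGetD sorted_key j 0) ' ']) [])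
  String.ofList rows.flatten

-- ===== PORT B =====
-- the comprehension's condition 'row_key[k] < row_key[j] or (row_key[k] == row_key[j] and k < j)';
-- Nat indices are exact: k, j range over range(len(row_key)), so this in-range indexing never raises.
def pvStable (key : Nat → Int) (k j : Nat) : Bool :=
  decide (key k < key j ∨ (key k = key j ∧ k < j))

def row_detransposition_alt (cipher : String) (row_key : List Int) : String :=
  let num_columns : Int := PySem.List.len row_key
  let num_rows : Int := PySem.Int.floordiv (PySem.Str.len cipher) num_columns
  let c : Nat := row_key.length
  -- rank[j] = sum(1 for k in range(num_columns) if …): counted as the length of the filtered range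
  let rank : List Nat := (List.range c).map (fun j =>
    ((List.range c).filter (fun k => pvStable (fun a => row_key.getD a 0) k j)).length)
  -- slot[rank[j]] = ch for j, ch in enumerate(row); rank[j] < c always, so List.set is exact;
  -- ''.join over slots of one-char strings = flatten of the singleton lists
  let pieces : List (List Char) :=
    (PySem.List.pyRange 0 num_rows).foldl (fun acc i =>
      let row := PySem.List.slice cipher.toList (some (i * num_columns)) (some ((i + 1) * num_columns))
      let slot := row.zipIdx.foldl (fun s x => s.set (rank.getD x.2 0) [x.1])
        (List.replicate c ([] : List Char))
      acc ++ [slot.flatten]) []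
  String.ofList pieces.flatten

-- ===== PRECONDITION & SPEC =====
-- Pre_ excludes only row_key = [], on which Python's '//' raises ZeroDivisionError in both A and B.
def Pre_row_detransposition (cipher : String) (row_key : List Int) : Prop := row_key ≠ []
instance (cipher : String) (row_key : List Int) : Decidable (Pre_row_detransposition cipher row_key) := by unfold Pre_row_detransposition; infer_instance
def pvWitness_row_detransposition : String × List Int := ("abcd", [1, 0])
def Spec_row_detransposition (cipher : String) (row_key : List Int) (out : String) : Prop := out = row_detransposition_alt cipher row_key
instance (cipher : String) (row_key : List Int) (out : String) : Decidable (Spec_row_detransposition cipher row_key out) := by unfold Spec_row_detransposition; infer_instance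

-- ===== CLAIM (what is proved, stated in full; the proofs are below) =====
def Claim_equal_row_detransposition : Prop := ∀ (cipher : String) (row_key : List Int), Dom_row_detransposition cipher row_key → Pre_row_detransposition cipher row_key → Spec_row_detransposition cipher row_key (row_detransposition cipher row_key)

-- ===== LEMMAS AND PROOFS =====

-- insertBy commutes with map when the comparison only looks at the key of the image.
theorem pv_insertBy_map {α β κ : Type} [LT κ] [DecidableLT κ] (g : α → β) (key : β → κ)
    (x : α) (acc : List α) :
    PySem.List.insertBy (fun a b => decide (key a < key b)) (g x) (acc.map g)
      = (PySem.List.insertBy (fun a b => decide (key (g a) < key (g b))) x acc).map g := by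
  induction acc with
  | nil => simp [PySem.List.insertBy]
  | cons y ys ih =>
    simp only [List.map_cons, PySem.List.insertBy]
    by_cases h : key (g x) < key (g y) <;> simp [h, ih]

-- stable sort of a mapped list = map of the stable sort by the composed key
theorem pv_sorted_map {α β κ : Type} [LT κ] [DecidableLT κ] (g : α → β) (key : β → κ)
    (xs : List α) :
    PySem.List.sorted (xs.map g) key false
      = (PySem.List.sorted xs (fun a => key (g a)) false).map g := by
  rw [PySem.List.sorted_eq_foldl_insertBy, PySem.List.sorted_eq_foldl_insertBy]
  suffices h : ∀ (acc : List α),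
      List.foldl (fun acc x => PySem.List.insertBy (fun a b => decide (key a < key b)) x acc)
        (acc.map g) (xs.map g)
      = (List.foldl (fun acc x => PySem.List.insertBy (fun a b => decide (key (g a) < key (g b))) x acc)
          acc xs).map g by
    simpa using h []
  induction xs with
  | nil => intro acc; simp
  | cons x xs ih =>
    intro acc
    simp only [List.map_cons, List.foldl_cons, pv_insertBy_map g key x acc]
    exact ih _

-- a full row slice has exactly num_columns characters
theorem pv_slice_len (cs : List Char) (n : Nat) (i : Int) (hn : 0 < n)
    (hi0 : 0 ≤ i) (hi1 : i < PySem.Int.floordiv (cs.length : Int) (n : Int)) :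
    (PySem.List.slice cs (some (i * (n : Int))) (some ((i + 1) * (n : Int)))).length = n := by
  have hmul : (i + 1) * (n : Int) = i * n + n := by ring
  have ha0 : 0 ≤ i * (n : Int) := mul_nonneg hi0 (by positivity)
  have hb : (i + 1) * (n : Int) ≤ (cs.length : Int) := by
    rw [← PySem.Int.le_floordiv_iff_mul_le (by exact_mod_cast hn)]
    omega
  rw [PySem.List.slice_of_nonneg cs ha0 (by omega) (by omega) hb]
  rw [List.length_take, List.length_drop]
  omega

-- the stable order pvStable is irreflexive and asymmetric
theorem pv_stable_irrefl (key : Nat → Int) (a : Nat) : pvStable key a a = false := by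
  simp [pvStable]

theorem pv_stable_asymm (key : Nat → Int) (a b : Nat) (h : pvStable key a b = true) :
    pvStable key b a = false := by
  simp only [pvStable, decide_eq_true_eq] at h
  simp only [pvStable, decide_eq_false_iff_not]
  omega

-- insertion by key preserves pairwise pvStable when the new element's index dominates the accumulator
theorem pv_insertBy_pairwise (key : Nat → Int) (x : Nat) (acc : List Nat)
    (hp : acc.Pairwise (fun a b => pvStable key a b = true)) (hlt : ∀ y ∈ acc, y < x) :
    (PySem.List.insertBy (fun a b => decide (key a < key b)) x acc).Pairwise
      (fun a b => pvStable key a b = true) := by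
  induction acc with
  | nil => simp [PySem.List.insertBy]
  | cons y ys ih =>
    simp only [PySem.List.insertBy]
    by_cases h : key x < key y
    · simp only [h, decide_true, if_true]
      refine List.Pairwise.cons ?_ hp
      intro z hz
      rcases List.mem_cons.mp hz with hz | hz
      · subst hz; simp [pvStable, h]
      · have hyz := (List.pairwise_cons.mp hp).1 z hz
        simp only [pvStable, decide_eq_true_eq] at hyz ⊢
        omega
    · simp only [h, decide_false]
      refine List.Pairwise.cons ?_ (ih (List.pairwise_cons.mp hp).2
        (fun z hz => hlt z (List.mem_cons_of_mem y hz)))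
      intro z hz
      rcases (PySem.List.mem_insertBy _ _ _ _).mp hz with hz | hz
      · subst hz
        have hyx : y < z := hlt y (List.mem_cons_self)
        simp only [pvStable, decide_eq_true_eq]
        omega
      · exact (List.pairwise_cons.mp hp).1 z hz

theorem pv_foldl_insertBy_pairwise (key : Nat → Int) :
    ∀ (L acc : List Nat), acc.Pairwise (fun a b => pvStable key a b = true) →
      (∀ y ∈ acc, ∀ x ∈ L, y < x) → L.Pairwise (· < ·) →
      (L.foldl (fun acc x => PySem.List.insertBy (fun a b => decide (key a < key b)) x acc)
        acc).Pairwise (fun a b => pvStable key a b = true) := by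
  intro L
  induction L with
  | nil => intro acc hp _ _; simpa using hp
  | cons x L ih =>
    intro acc hp hlt hL
    simp only [List.foldl_cons]
    refine ih _ (pv_insertBy_pairwise key x acc hp (fun y hy => hlt y hy x List.mem_cons_self)) ?_
      (List.pairwise_cons.mp hL).2
    intro y hy z hz
    rcases (PySem.List.mem_insertBy _ _ _ _).mp hy with hy | hy
    · subst hy; exact (List.pairwise_cons.mp hL).1 z hz
    · exact hlt y hy z (List.mem_cons_of_mem x hz)

-- the stable argsort is pairwise-increasing in the stable order (key, then original index)
theorem pv_sorted_range_pairwise (key : Nat → Int) (n : Nat) :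
    (PySem.List.sorted (List.range n) key false).Pairwise (fun a b => pvStable key a b = true) := by
  rw [PySem.List.sorted_eq_foldl_insertBy]
  exact pv_foldl_insertBy_pairwise key (List.range n) [] (by simp) (by simp) List.pairwise_lt_range

-- in a list pairwise-increasing under an irreflexive asymmetric Bool order, the number of
-- elements below the p-th element is exactly p
theorem pv_countP_pairwise {α : Type} (R : α → α → Bool) :
    ∀ (l : List α), l.Pairwise (fun a b => R a b = true) →
      (∀ a b, R a b = true → R b a = false) → (∀ a, R a a = false) →
      ∀ (p : Nat) (hp : p < l.length), l.countP (fun k => R k l[p]) = p := by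
  intro l
  induction l with
  | nil => intro _ _ _ p hp; simp at hp
  | cons x xs ih =>
    intro hp hasym hirr p hplen
    match p with
    | 0 =>
      have h0 : xs.countP (fun k => R k x) = 0 := by
        apply List.countP_eq_zero.mpr
        intro a ha
        simp [hasym x a ((List.pairwise_cons.mp hp).1 a ha)]
      simp [hirr x, h0]
    | q + 1 =>
      have hq : q < xs.length := by simpa using hplen
      simp only [List.getElem_cons_succ, List.countP_cons]
      have hx : R x xs[q] = true := (List.pairwise_cons.mp hp).1 _ (List.getElem_mem hq)
      rw [ih (List.pairwise_cons.mp hp).2 hasym hirr q hq]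
      simp [hx]

-- rank (counted over range n) of the p-th element of the stable argsort is p
theorem pv_rank_of_sorted (key : Nat → Int) (n p : Nat)
    (hp : p < (PySem.List.sorted (List.range n) key false).length) :
    ((List.range n).filter
        (fun k => pvStable key k (PySem.List.sorted (List.range n) key false)[p])).length = p := by
  rw [← List.countP_eq_length_filter]
  rw [← (PySem.List.sorted_perm (List.range n) key false).countP_eq]
  exact pv_countP_pairwise (pvStable key) _ (pv_sorted_range_pairwise key n)
    (pv_stable_asymm key) (pv_stable_irrefl key) p hp

-- a fold of set-writes at positions all different from p leaves entry p unchanged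
theorem pv_foldl_set_skip {α γ : Type} (F : α → Nat) (G : α → γ) :
    ∀ (l : List α) (s : List γ) (p : Nat) (d : γ), (∀ x ∈ l, F x ≠ p) →
      (l.foldl (fun s x => s.set (F x) (G x)) s).getD p d = s.getD p d := by
  intro l
  induction l with
  | nil => intro s p d _; rfl
  | cons x xs ih =>
    intro s p d h
    simp only [List.foldl_cons]
    rw [ih _ p d (fun y hy => h y (List.mem_cons_of_mem x hy))]
    simp [List.getD_eq_getElem?_getD, List.getElem?_set_ne (h x List.mem_cons_self)]

theorem pv_foldl_set_length {α γ : Type} (F : α → Nat) (G : α → γ) :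
    ∀ (l : List α) (s : List γ), (l.foldl (fun s x => s.set (F x) (G x)) s).length = s.length := by
  intro l
  induction l with
  | nil => intro s; rfl
  | cons x xs ih => intro s; simp only [List.foldl_cons]; rw [ih]; simp

-- scatter over an enumerated row: if j is the unique in-range index with F j = p, entry p ends
-- up holding G of the j-th character
theorem pv_scatter_zipIdx {γ : Type} (F : Nat → Nat) (G : Char → γ) (dc : Char) :
    ∀ (row : List Char) (off : Nat) (s : List γ) (p : Nat) (d : γ) (j : Nat),
      off ≤ j → j < off + row.length → F j = p →
      (∀ k, off ≤ k → k < off + row.length → F k = p → k = j) → p < s.length →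
      ((row.zipIdx off).foldl (fun s x => s.set (F x.2) (G x.1)) s).getD p d
        = G (row.getD (j - off) dc) := by
  intro row
  induction row with
  | nil => intro off s p d j h1 h2; simp at h2; omega
  | cons ch rest ih =>
    intro off s p d j h1 h2 hFj huniq hps
    simp only [List.length_cons] at h2
    simp only [List.zipIdx_cons, List.foldl_cons]
    by_cases hj : j = off
    · subst hj
      rw [pv_foldl_set_skip]
      · rw [hFj]
        simp [List.getD_eq_getElem?_getD, hps]
      · intro x hx hFx
        have hx1 := List.le_snd_of_mem_zipIdx hx
        have hx2 := List.snd_lt_of_mem_zipIdx hx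
        have := huniq x.2 (by omega) (by simp only [List.length_cons]; omega) hFx
        omega
    · have hoff : F off ≠ p := by
        intro hF
        exact hj (huniq off (le_refl off) (by simp only [List.length_cons]; omega) hF).symm
      have := ih (off + 1) (s.set (F (ch, off).2) (G (ch, off).1)) p d j (by omega) (by omega) hFj
        (fun k hk1 hk2 hk3 => huniq k (by omega) (by simp only [List.length_cons]; omega) hk3)
        (by simpa using hps)
      rw [this]
      have : j - off = (j - (off + 1)) + 1 := by omega
      simp [this]

-- flatten of singleton lists
theorem pv_flatten_singletons {α β : Type} (l : List α) (f : α → β) :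
    (l.map (fun a => [f a])).flatten = l.map f := by
  induction l with
  | nil => rfl
  | cons x xs ih => simp [ih]

theorem pv_flatten_flatMap_singleton {α β : Type} (l : List α) (f : α → List β) :
    (l.flatMap (fun a => [f a])).flatten = l.flatMap f := by
  induction l with
  | nil => rfl
  | cons x xs ih => simp [ih]

-- A's per-row gather, reduced to a Nat-indexed map through the Nat-valued stable argsort
theorem pv_rowA (row_key : List Int) (row : List Char) :
    ((PySem.List.pyRange 0 (PySem.List.len row_key)).map
      (fun j => PySem.List.pyGetD row
        (PySem.List.pyGetD
          (PySem.List.sorted (PySem.List.pyRange 0 (PySem.List.len row_key))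
            (fun k => PySem.List.pyGetD row_key k 0) false) j 0) ' '))
    = (List.range row_key.length).map (fun p =>
        row.getD ((PySem.List.sorted (List.range row_key.length)
          (fun a => row_key.getD a 0) false).getD p 0) ' ') := by
  set n := row_key.length with hn
  have hr : PySem.List.pyRange 0 (PySem.List.len row_key)
      = (List.range n).map (fun k : Nat => (k : Int)) := by
    rw [PySem.List.len_eq, ← hn, PySem.List.pyRange_zero_nat]
  have hkeyA : (fun a : Nat => PySem.List.pyGetD row_key ((a : Int)) 0)
      = (fun a : Nat => row_key.getD a 0) := by
    funext a; exact PySem.List.pyGetD_natCast row_key a 0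
  set S : List Nat := PySem.List.sorted (List.range n) (fun a => row_key.getD a 0) false with hS
  have hSlen : S.length = n := by rw [hS, PySem.List.length_sorted, List.length_range]
  have hSK : PySem.List.sorted (PySem.List.pyRange 0 (PySem.List.len row_key))
      (fun k => PySem.List.pyGetD row_key k 0) false = S.map (fun k : Nat => (k : Int)) := by
    rw [hr, pv_sorted_map, hkeyA]
  rw [hSK, hr, List.map_map]
  apply List.map_congr_left
  intro k hk
  have hk' : k < S.length := by rw [hSlen]; exact List.mem_range.mp hk
  simp only [Function.comp_apply, PySem.List.pyGetD_natCast]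
  rw [List.getD_eq_getElem _ 0 (by simpa using hk'), List.getElem_map,
    PySem.List.pyGetD_natCast, ← List.getD_eq_getElem S 0 hk']

-- B's per-row scatter produces exactly the same characters
theorem pv_rowB (row_key : List Int) (row : List Char) (hlen : row.length = row_key.length) :
    ((row.zipIdx.foldl
        (fun s x => s.set
          (((List.range row_key.length).map (fun j => ((List.range row_key.length).filter
              (fun k => pvStable (fun a => row_key.getD a 0) k j)).length)).getD x.2 0) [x.1])
        (List.replicate row_key.length ([] : List Char))).flatten)
    = (List.range row_key.length).map (fun p =>
        row.getD ((PySem.List.sorted (List.range row_key.length)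
          (fun a => row_key.getD a 0) false).getD p 0) ' ') := by
  set n := row_key.length with hn
  set key : Nat → Int := fun a => row_key.getD a 0 with hkey
  set S : List Nat := PySem.List.sorted (List.range n) key false with hS
  set rank : List Nat := (List.range n).map (fun j =>
    ((List.range n).filter (fun k => pvStable key k j)).length) with hrank
  have hSlen : S.length = n := by rw [hS, PySem.List.length_sorted, List.length_range]
  -- rank lookup agrees with the filter count, for in-range j
  have hrankD : ∀ j, j < n → rank.getD j 0
      = ((List.range n).filter (fun k => pvStable key k j)).length := by
    intro j hj
    rw [hrank, List.getD_eq_getElem _ 0 (by simpa using hj), List.getElem_map, List.getElem_range]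
  -- rank of S[p] is p
  have hrankS : ∀ p (hp : p < n), rank.getD (S.getD p 0) 0 = p := by
    intro p hp
    have hp' : p < S.length := by omega
    have hmem : S[p] ∈ List.range n := by
      rw [← PySem.List.mem_sorted (List.range n) key false]
      exact List.getElem_mem hp'
    have hjn : S[p] < n := List.mem_range.mp hmem
    rw [List.getD_eq_getElem S 0 hp', hrankD _ hjn]
    exact pv_rank_of_sorted key n p hp'
  -- the unique index written to slot p is S[p]
  have huniq : ∀ p (hp : p < n) k, k < n → rank.getD k 0 = p → k = S.getD p 0 := by
    intro p hp k hk hrk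
    have hkmem : k ∈ S := by
      rw [hS, PySem.List.mem_sorted]; exact List.mem_range.mpr hk
    obtain ⟨q, hq, hkq⟩ := List.mem_iff_getElem.mp hkmem
    have hqn : q < n := by omega
    have hgd : S.getD q 0 = S[q] := List.getD_eq_getElem S 0 hq
    have : rank.getD k 0 = q := by
      rw [← hkq, ← hgd]; exact hrankS q hqn
    have hpq : q = p := by omega
    subst hpq
    rw [← hkq]
    exact hgd.symm
  -- the scatter result, entry by entry
  have hmain : (row.zipIdx.foldl (fun s x => s.set (rank.getD x.2 0) [x.1])
      (List.replicate n ([] : List Char)))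
      = (List.range n).map (fun p => [row.getD (S.getD p 0) ' ']) := by
    apply List.ext_getElem
    · rw [pv_foldl_set_length (fun x : Char × Nat => rank.getD x.2 0) (fun x : Char × Nat => [x.1])]
      simp
    · intro p h1 h2
      have hpn : p < n := by simpa using h2
      have hSp : S.getD p 0 < n := by
        have hp' : p < S.length := by omega
        have hmem : S[p] ∈ List.range n := by
          rw [← PySem.List.mem_sorted (List.range n) key false]
          exact List.getElem_mem hp'
        rw [List.getD_eq_getElem S 0 hp']
        exact List.mem_range.mp hmem
      have := pv_scatter_zipIdx (fun t => rank.getD t 0) (fun c => [c]) ' '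
        row 0 (List.replicate n ([] : List Char)) p [] (S.getD p 0)
        (Nat.zero_le _) (by omega) (hrankS p hpn)
        (fun k _ hk2 hk3 => huniq p hpn k (by omega) hk3) (by simpa using hpn)
      simp only [Nat.sub_zero] at this
      rw [← List.getD_eq_getElem _ ([] : List Char) h1, this,
        List.getElem_map, List.getElem_range]
  rw [hmain, pv_flatten_singletons]

-- ===== VERDICT (by name: the statement is the Claim_ definition above) =====
theorem row_detransposition_spec : Claim_equal_row_detransposition := by
  intro cipher row_key hdom hpre
  unfold Spec_row_detransposition
  unfold row_detransposition row_detransposition_alt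
  simp only [PySem.List.foldl_append_eq_flatMap, List.nil_append]
  rw [← List.flatMap_def, pv_flatten_flatMap_singleton]
  apply congrArg
  apply List.flatMap_congr
  intro i hi
  have hn : 0 < row_key.length := List.length_pos_iff.mpr hpre
  obtain ⟨hi0, hi1⟩ := PySem.List.mem_pyRange_one.mp hi
  rw [PySem.Str.len_eq, PySem.List.len_eq] at hi1
  have hrl := pv_slice_len cipher.toList row_key.length i hn hi0 hi1
  rw [← List.map_eq_flatMap, pv_rowA row_key _]
  exact (pv_rowB row_key _ hrl).symm
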